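-- pv_equiv track=rewrite | github.com/Aniketpatro11/crispr | streamlit_app.py | highlight_sequence_html
-- ===== SOURCE A (Python) =====
-- def highlight_sequence_html(seq: str, guides_meta, width: int = 70) -> str:
--     # mark each base: normal / guide / pam
--     pos = ["normal"] * len(seq)
--     for g in guides_meta:
--         for i in range(max(0, g["guide_start"]), min(len(seq), g["guide_end"])):
--             pos[i] = "guide"
--         for i in range(max(0, g["pam_start"]), min(len(seq), g["pam_end"])):
--             pos[i] = "pam"
--
--     lines = []
--     for i in range(0, len(seq), width):
--         block = []
--         for j in range(i, min(i + width, len(seq))):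
--             if pos[j] == "guide":
--                 block.append(f"<span style='color:#0A8F5B;font-weight:700'>{seq[j]}</span>")
--             elif pos[j] == "pam":
--                 block.append(f"<span style='color:#D83A3A;font-weight:800'>{seq[j]}</span>")
--             else:
--                 block.append(seq[j])
--         lines.append(f"<span style='color:gray'>[{i:04d}] </span>" + "".join(block))
--     return "<br>".join(lines)
-- ===== SOURCE B (Python) =====
-- def highlight_sequence_html(seq: str, guides_meta, width: int = 70) -> str:
--     n = len(seq)
--
--     def category(i):
--         # last-painted wins in A, so scan guides back-to-front; within one
--         # guide PAM was painted after the guide span, so PAM is checked first.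
--         for g in reversed(guides_meta):
--             if max(0, g["pam_start"]) <= i < min(n, g["pam_end"]):
--                 return "pam"
--             if max(0, g["guide_start"]) <= i < min(n, g["guide_end"]):
--                 return "guide"
--         return "normal"
--
--     def paint(cat, c):
--         if cat == "guide":
--             return "<span style='color:#0A8F5B;font-weight:700'>" + c + "</span>"
--         if cat == "pam":
--             return "<span style='color:#D83A3A;font-weight:800'>" + c + "</span>"
--         return c
--
--     rendered = [paint(category(i), c) for i, c in enumerate(seq)]
--     return "<br>".join(
--         f"<span style='color:gray'>[{i:04d}] </span>" + "".join(rendered[i:i + width])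
--         for i in range(0, n, width))
-- ===== Notes on version B (the rewrite author's own statement) =====
-- stated objective: alternative
-- what changed: B replaces A's mutable paint array plus nested block-building loops by a pure per-base classification (scanning guides back-to-front with PAM checked before guide) and slice-based chunking of a once-rendered list.
import Mathlib
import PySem

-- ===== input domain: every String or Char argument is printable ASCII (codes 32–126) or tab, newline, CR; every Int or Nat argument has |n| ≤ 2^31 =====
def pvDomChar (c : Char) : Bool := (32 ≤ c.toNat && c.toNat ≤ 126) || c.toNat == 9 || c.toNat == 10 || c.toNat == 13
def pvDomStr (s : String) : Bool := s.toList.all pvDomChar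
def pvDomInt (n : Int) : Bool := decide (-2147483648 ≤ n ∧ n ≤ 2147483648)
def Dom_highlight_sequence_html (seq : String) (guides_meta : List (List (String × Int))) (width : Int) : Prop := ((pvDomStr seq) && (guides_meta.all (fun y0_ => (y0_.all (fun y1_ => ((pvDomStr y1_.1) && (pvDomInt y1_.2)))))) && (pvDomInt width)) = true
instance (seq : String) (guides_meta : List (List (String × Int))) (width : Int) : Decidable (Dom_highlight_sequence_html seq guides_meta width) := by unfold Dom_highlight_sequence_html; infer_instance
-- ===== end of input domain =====

-- B replaces A's mutable paint array + nested block loop by a pure per-base classification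
-- (scanning the guides back-to-front) followed by slice-based chunking; same return value.

-- g["k"]: first-binding association-list lookup; Pre_ guarantees the key is present and keys are unique
def pvGetKey (g : List (String × Int)) (k : String) : Int :=
  (g.lookup k).getD 0

-- f"<span style='color:gray'>[{i:04d}] </span>": i ≥ 0 on every index reached, where {:04d} is str(i).zfill(4) (exact there)
def pvMarker (i : Int) : String :=
  "<span style='color:gray'>[" ++ PySem.Str.zfill (PySem.Int.toStr i) 4 ++ "] </span>"

-- ===== PORT A =====
-- the two 'for i in range(max(0,…), min(len(seq),…)): pos[i] = …' loops of one guide g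
def pvPaint (n : Int) (pos : List String) (g : List (String × Int)) : List String :=
  let pos1 := (PySem.List.pyRange (max 0 (pvGetKey g "guide_start")) (min n (pvGetKey g "guide_end")) 1).foldl
      (fun p i => p.set i.toNat "guide") pos   -- i ≥ 0 here, so .toNat is exact
  (PySem.List.pyRange (max 0 (pvGetKey g "pam_start")) (min n (pvGetKey g "pam_end")) 1).foldl
      (fun p i => p.set i.toNat "pam") pos1

def highlight_sequence_html (seq : String) (guides_meta : List (List (String × Int))) (width : Int) : String :=
  let cs := seq.toList
  let n : Int := (cs.length : Int)
  let pos := guides_meta.foldl (pvPaint n) (List.replicate cs.length "normal")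
  let lines := (PySem.List.pyRange 0 n width).foldl (fun ls i =>
    let block := (PySem.List.pyRange i (min (i + width) n) 1).foldl (fun b j =>
      if PySem.List.pyGetD pos j "" == "guide" then
        b ++ ["<span style='color:#0A8F5B;font-weight:700'>" ++ String.mk [PySem.List.pyGetD cs j ' '] ++ "</span>"]
      else if PySem.List.pyGetD pos j "" == "pam" then
        b ++ ["<span style='color:#D83A3A;font-weight:800'>" ++ String.mk [PySem.List.pyGetD cs j ' '] ++ "</span>"]
      else b ++ [String.mk [PySem.List.pyGetD cs j ' ']]) []
    ls ++ [pvMarker i ++ PySem.Str.join "" block]) []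
  PySem.Str.join "<br>" lines

-- ===== PORT B =====
-- category(i): scan the guides back-to-front, PAM before guide within one guide
def pvCategory (n : Int) (i : Int) : List (List (String × Int)) → String
  | [] => "normal"
  | g :: rest =>
    if max 0 (pvGetKey g "pam_start") ≤ i ∧ i < min n (pvGetKey g "pam_end") then "pam"
    else if max 0 (pvGetKey g "guide_start") ≤ i ∧ i < min n (pvGetKey g "guide_end") then "guide"
    else pvCategory n i rest

def pvPaintChar (cat : String) (c : Char) : String :=
  if cat == "guide" then "<span style='color:#0A8F5B;font-weight:700'>" ++ String.mk [c] ++ "</span>"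
  else if cat == "pam" then "<span style='color:#D83A3A;font-weight:800'>" ++ String.mk [c] ++ "</span>"
  else String.mk [c]

def highlight_sequence_html_alt (seq : String) (guides_meta : List (List (String × Int))) (width : Int) : String :=
  let cs := seq.toList
  let n : Int := (cs.length : Int)
  let revg := guides_meta.reverse
  let rendered := (PySem.List.enumerate cs).map (fun ic => pvPaintChar (pvCategory n ic.1 revg) ic.2)
  let lines := (PySem.List.pyRange 0 n width).map (fun i =>
    pvMarker i ++ PySem.Str.join "" (PySem.List.slice rendered (some i) (some (i + width))))
  PySem.Str.join "<br>" lines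

-- ===== PRECONDITION & SPEC =====
-- Pre_ excludes exactly: width = 0 (range() raises ValueError in A and B) and a guide whose
-- association list misses one of the four keys (KeyError in A and B); it also excludes guides with
-- duplicate keys, where the Python dict constructor's last-binding-wins collapse makes either
-- assoc-list reading a defensible corner (A and B agree in Python there).
def Pre_highlight_sequence_html (seq : String) (guides_meta : List (List (String × Int))) (width : Int) : Prop :=
  width ≠ 0 ∧ ∀ g ∈ guides_meta,
    (g.map Prod.fst).Nodup ∧
    (g.lookup "guide_start").isSome = true ∧ (g.lookup "guide_end").isSome = true ∧
    (g.lookup "pam_start").isSome = true ∧ (g.lookup "pam_end").isSome = true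
instance (seq : String) (guides_meta : List (List (String × Int))) (width : Int) : Decidable (Pre_highlight_sequence_html seq guides_meta width) := by unfold Pre_highlight_sequence_html; infer_instance

def pvWitness_highlight_sequence_html : String × (List (List (String × Int))) × Int :=
  ("ACGTACGT", [[("guide_start", 0), ("guide_end", 4), ("pam_start", 4), ("pam_end", 6)]], 5)

def Spec_highlight_sequence_html (seq : String) (guides_meta : List (List (String × Int))) (width : Int) (out : String) : Prop := out = highlight_sequence_html_alt seq guides_meta width
instance (seq : String) (guides_meta : List (List (String × Int))) (width : Int) (out : String) : Decidable (Spec_highlight_sequence_html seq guides_meta width out) := by unfold Spec_highlight_sequence_html; infer_instance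

-- ===== CLAIM (what is proved, stated in full; the proofs are below) =====
def Claim_equal_highlight_sequence_html : Prop := ∀ (seq : String) (guides_meta : List (List (String × Int))) (width : Int), Dom_highlight_sequence_html seq guides_meta width → Pre_highlight_sequence_html seq guides_meta width → Spec_highlight_sequence_html seq guides_meta width (highlight_sequence_html seq guides_meta width)

-- ===== LEMMAS AND PROOFS =====

-- range(0, n, w) is empty for n ≥ 0, w ≤ 0
theorem pyRange_nonpos_step (n w : Int) (hn : 0 ≤ n) (hw : w ≤ 0) :
    PySem.List.pyRange 0 n w = [] := by
  unfold PySem.List.pyRange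
  rcases lt_or_eq_of_le hw with h | h
  · rw [if_neg (by omega), if_neg (by omega), if_neg (by omega)]
    simp
  · simp [← h]

theorem length_paintFold (lbl : String) (r : List Int) (pos : List String) :
    (r.foldl (fun p i => p.set i.toNat lbl) pos).length = pos.length := by
  induction r generalizing pos with
  | nil => rfl
  | cons x t ih => simp [List.foldl, ih]

theorem getElem?_paintFold_aux (lbl : String) (j : Nat) :
    ∀ (k : Nat) (a : Int) (pos : List String), 0 ≤ a → j < pos.length →
    ((PySem.List.pyRange a (a + (k : Int)) 1).foldl (fun p i => p.set i.toNat lbl) pos)[j]? =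
      if a ≤ (j : Int) ∧ (j : Int) < a + (k : Int) then some lbl else pos[j]? := by
  intro k
  induction k with
  | zero =>
    intro a pos _ _
    rw [PySem.List.pyRange_one_eq_nil (by omega)]
    simp only [List.foldl_nil]
    rw [if_neg (by omega)]
  | succ k ih =>
    intro a pos ha hj
    rw [PySem.List.pyRange_one_cons (by omega)]
    simp only [List.foldl_cons]
    have h1 : ((PySem.List.pyRange (a + 1) (a + ((k : Int) + 1)) 1).foldl
        (fun p i => p.set i.toNat lbl) (pos.set a.toNat lbl))[j]? =
        if a + 1 ≤ (j : Int) ∧ (j : Int) < a + ((k : Int) + 1) then some lbl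
        else (pos.set a.toNat lbl)[j]? := by
      have h0 := ih (a + 1) (pos.set a.toNat lbl) (by omega) (by simpa using hj)
      rw [show (a + 1) + (k : Int) = a + ((k : Int) + 1) by ring] at h0
      exact h0
    push_cast
    rw [h1]
    by_cases hja : (j : Int) = a
    · have : a.toNat = j := by omega
      rw [if_neg (by omega), if_pos (by omega), this, List.getElem?_set_self hj]
    · rw [List.getElem?_set_ne (by omega)]
      split_ifs <;> first | rfl | omega

theorem getElem?_paintFold (lbl : String) (a b : Int) (pos : List String) (j : Nat)
    (ha : 0 ≤ a) (hj : j < pos.length) :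
    ((PySem.List.pyRange a b 1).foldl (fun p i => p.set i.toNat lbl) pos)[j]? =
      if a ≤ (j : Int) ∧ (j : Int) < b then some lbl else pos[j]? := by
  by_cases hab : b ≤ a
  · rw [PySem.List.pyRange_one_eq_nil hab]
    simp only [List.foldl_nil]
    rw [if_neg (by omega)]
  · have hb : b = a + ((b - a).toNat : Int) := by omega
    rw [hb, getElem?_paintFold_aux lbl j (b - a).toNat a pos ha hj]

theorem length_pvPaint (n : Int) (pos : List String) (g : List (String × Int)) :
    (pvPaint n pos g).length = pos.length := by
  unfold pvPaint
  rw [length_paintFold, length_paintFold]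

theorem getElem?_pvPaint (n : Int) (pos : List String) (g : List (String × Int)) (j : Nat)
    (hj : j < pos.length) :
    (pvPaint n pos g)[j]? =
      if max 0 (pvGetKey g "pam_start") ≤ (j : Int) ∧ (j : Int) < min n (pvGetKey g "pam_end") then some "pam"
      else if max 0 (pvGetKey g "guide_start") ≤ (j : Int) ∧ (j : Int) < min n (pvGetKey g "guide_end") then some "guide"
      else pos[j]? := by
  unfold pvPaint
  rw [getElem?_paintFold _ _ _ _ _ (by omega) (by rw [length_paintFold]; exact hj),
      getElem?_paintFold _ _ _ _ _ (by omega) hj]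

-- first guide (scanning back-to-front) that claims base i, if any
def pvHit (n i : Int) : List (List (String × Int)) → Option String
  | [] => none
  | g :: rest =>
    if max 0 (pvGetKey g "pam_start") ≤ i ∧ i < min n (pvGetKey g "pam_end") then some "pam"
    else if max 0 (pvGetKey g "guide_start") ≤ i ∧ i < min n (pvGetKey g "guide_end") then some "guide"
    else pvHit n i rest

theorem pvCategory_eq_hit (n i : Int) (gs : List (List (String × Int))) :
    pvCategory n i gs = (pvHit n i gs).getD "normal" := by
  induction gs with
  | nil => rfl
  | cons g rest ih =>
    unfold pvCategory pvHit
    split_ifs <;> simp [ih]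

theorem length_paintAll (n : Int) (gs : List (List (String × Int))) (pos : List String) :
    (gs.foldl (pvPaint n) pos).length = pos.length := by
  induction gs generalizing pos with
  | nil => rfl
  | cons g rest ih => simp only [List.foldl_cons]; rw [ih, length_pvPaint]

theorem getElem?_paintAll (n : Int) (gs : List (List (String × Int))) (pos : List String) (j : Nat)
    (hj : j < pos.length) :
    (gs.foldl (pvPaint n) pos)[j]? =
      match pvHit n (j : Int) gs.reverse with
      | some lbl => some lbl
      | none => pos[j]? := by
  induction gs using List.reverseRecOn generalizing pos with
  | nil => simp [pvHit]
  | append_singleton gs g ih =>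
    rw [List.foldl_append]
    simp only [List.foldl_cons, List.foldl_nil, List.reverse_append, List.reverse_cons,
      List.reverse_nil, List.nil_append, List.cons_append]
    rw [getElem?_pvPaint _ _ _ _ (by rw [length_paintAll]; exact hj)]
    unfold pvHit
    split_ifs with h1 h2
    · rfl
    · rfl
    · exact ih pos hj

-- the paint array at a valid index IS B's category
theorem pos_getElem? (n : Int) (gs : List (List (String × Int))) (m : Nat) (j : Nat) (hj : j < m) :
    (gs.foldl (pvPaint n) (List.replicate m "normal"))[j]? = some (pvCategory n (j : Int) gs.reverse) := by
  rw [getElem?_paintAll _ _ _ _ (by simpa using hj), pvCategory_eq_hit]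
  cases pvHit n (j : Int) gs.reverse with
  | none => simp [hj]
  | some lbl => rfl

-- rendered[j] for 0 ≤ j < len cs
theorem rendered_pyGetD (cs : List Char) (revg : List (List (String × Int))) (j : Int) (d : String)
    (hj0 : 0 ≤ j) (hjn : j < (cs.length : Int)) :
    PySem.List.pyGetD ((PySem.List.enumerate cs).map
        (fun ic => pvPaintChar (pvCategory (cs.length : Int) ic.1 revg) ic.2)) j d =
      pvPaintChar (pvCategory (cs.length : Int) j revg) (PySem.List.pyGetD cs j ' ') := by
  have hlen : j.toNat < cs.length := by omega
  rw [PySem.List.pyGetD_eq_getElem _ d hj0 (by simpa using hjn),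
      PySem.List.pyGetD_eq_getElem _ ' ' hj0 (by simpa using hjn)]
  have h1 : ((PySem.List.enumerate cs).map
      (fun ic => pvPaintChar (pvCategory (cs.length : Int) ic.1 revg) ic.2))[j.toNat]? =
      some (pvPaintChar (pvCategory (cs.length : Int) j revg) cs[j.toNat]) := by
    rw [List.getElem?_map, PySem.List.getElem?_enumerate, List.getElem?_eq_getElem hlen]
    simp only [Option.map_some]
    have : (0 : Int) + (j.toNat : Int) = j := by omega
    rw [this]
  have hlen2 : j.toNat < ((PySem.List.enumerate cs).map
      (fun ic => pvPaintChar (pvCategory (cs.length : Int) ic.1 revg) ic.2)).length := by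
    simpa [PySem.List.length_enumerate] using hlen
  exact Option.some.inj ((List.getElem?_eq_getElem hlen2).symm.trans h1)

-- slice of the rendered list = map over the inner index range (0 ≤ i < n, 0 < w)
theorem slice_eq_map_range {β : Type} (xs : List β) (d : β) (i w : Int)
    (hi : 0 ≤ i) (hw : 0 < w) :
    PySem.List.slice xs (some i) (some (i + w)) =
      (PySem.List.pyRange i (min (i + w) (xs.length : Int)) 1).map (fun j => PySem.List.pyGetD xs j d) := by
  set n : Int := (xs.length : Int) with hn
  by_cases hin : n ≤ i
  · -- empty on both sides
    have h1 : PySem.List.pyRange i (min (i + w) n) 1 = [] :=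
      PySem.List.pyRange_one_eq_nil (by omega)
    rw [h1, List.map_nil, PySem.List.slice_toNat _ hi (by omega)]
    rw [List.drop_eq_nil_of_le (by omega), List.take_nil]
  · push_neg at hin
    have hsplit : PySem.List.pyRange i n 1 =
        PySem.List.pyRange i (min (i + w) n) 1 ++ PySem.List.pyRange (min (i + w) n) n 1 :=
      PySem.List.pyRange_one_append i (min (i + w) n) n (by omega) (by omega)
    have hfull : (PySem.List.pyRange i n 1).map (fun j => PySem.List.pyGetD xs j d) = xs.drop i.toNat := by
      rw [hn]
      exact PySem.List.map_pyGetD_pyRange' xs d hi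
    have hlen1 : (PySem.List.pyRange i (min (i + w) n) 1).length = (min (i + w) n - i).toNat :=
      PySem.List.length_pyRange_one _ _
    have htake : ((PySem.List.pyRange i n 1).map (fun j => PySem.List.pyGetD xs j d)).take
        ((min (i + w) n - i).toNat) =
        (PySem.List.pyRange i (min (i + w) n) 1).map (fun j => PySem.List.pyGetD xs j d) := by
      rw [hsplit, List.map_append, List.take_append_of_le_length (by simp [hlen1]),
          List.take_of_length_le (by simp [hlen1])]
    rw [← htake, hfull, PySem.List.slice_toNat _ hi (by omega)]
    by_cases hcase : i + w ≤ n
    · rw [min_eq_left hcase]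
      congr 1
      omega
    · rw [min_eq_right (by omega)]
      rw [List.take_of_length_le (by simp [List.length_drop]; omega),
          List.take_of_length_le (by simp [List.length_drop]; omega)]

-- ===== VERDICT (by name: the statement is the Claim_ definition above) =====
set_option maxRecDepth 8192 in
set_option maxHeartbeats 1000000 in
theorem highlight_sequence_html_spec : Claim_equal_highlight_sequence_html := by
  intro seq guides_meta width _ _
  unfold Spec_highlight_sequence_html highlight_sequence_html highlight_sequence_html_alt
  dsimp only
  set cs := seq.toList with hcs
  set n : Int := (cs.length : Int) with hn
  set revg := guides_meta.reverse with hrevg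
  set pos := guides_meta.foldl (pvPaint n) (List.replicate cs.length "normal") with hpos
  set rendered := (PySem.List.enumerate cs).map (fun ic => pvPaintChar (pvCategory n ic.1 revg) ic.2) with hrend
  clear_value cs n revg pos rendered
  congr 1
  -- the two line lists are equal
  by_cases hw : 0 < width
  case neg =>
    rw [pyRange_nonpos_step n width (by omega) (by omega)]
    rfl
  case pos =>
  -- A's outer append-loop is a map
  have houter :
      (PySem.List.pyRange 0 n width).foldl (fun ls i =>
        ls ++ [pvMarker i ++ PySem.Str.join ""
          ((PySem.List.pyRange i (min (i + width) n) 1).foldl (fun b j =>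
            if PySem.List.pyGetD pos j "" == "guide" then
              b ++ ["<span style='color:#0A8F5B;font-weight:700'>" ++ String.mk [PySem.List.pyGetD cs j ' '] ++ "</span>"]
            else if PySem.List.pyGetD pos j "" == "pam" then
              b ++ ["<span style='color:#D83A3A;font-weight:800'>" ++ String.mk [PySem.List.pyGetD cs j ' '] ++ "</span>"]
            else b ++ [String.mk [PySem.List.pyGetD cs j ' ']]) [])]) [] =
      (PySem.List.pyRange 0 n width).map (fun i =>
        pvMarker i ++ PySem.Str.join ""
          ((PySem.List.pyRange i (min (i + width) n) 1).foldl (fun b j =>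
            if PySem.List.pyGetD pos j "" == "guide" then
              b ++ ["<span style='color:#0A8F5B;font-weight:700'>" ++ String.mk [PySem.List.pyGetD cs j ' '] ++ "</span>"]
            else if PySem.List.pyGetD pos j "" == "pam" then
              b ++ ["<span style='color:#D83A3A;font-weight:800'>" ++ String.mk [PySem.List.pyGetD cs j ' '] ++ "</span>"]
            else b ++ [String.mk [PySem.List.pyGetD cs j ' ']]) [])) := by
    exact PySem.List.foldl_append_singleton_eq_map _ _ []
  rw [houter]
  apply List.map_congr_left
  intro i hi
  obtain ⟨hi0, hin, -⟩ := (PySem.List.mem_pyRange_iff_of_pos hw i).mp hi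
  congr 1
  -- the per-line blocks are equal
  -- A's inner append-loop is a map
  have hinner :
      (PySem.List.pyRange i (min (i + width) n) 1).foldl (fun b j =>
        if PySem.List.pyGetD pos j "" == "guide" then
          b ++ ["<span style='color:#0A8F5B;font-weight:700'>" ++ String.mk [PySem.List.pyGetD cs j ' '] ++ "</span>"]
        else if PySem.List.pyGetD pos j "" == "pam" then
          b ++ ["<span style='color:#D83A3A;font-weight:800'>" ++ String.mk [PySem.List.pyGetD cs j ' '] ++ "</span>"]
        else b ++ [String.mk [PySem.List.pyGetD cs j ' ']]) [] =
      (PySem.List.pyRange i (min (i + width) n) 1).map (fun j =>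
        if PySem.List.pyGetD pos j "" == "guide" then
          "<span style='color:#0A8F5B;font-weight:700'>" ++ String.mk [PySem.List.pyGetD cs j ' '] ++ "</span>"
        else if PySem.List.pyGetD pos j "" == "pam" then
          "<span style='color:#D83A3A;font-weight:800'>" ++ String.mk [PySem.List.pyGetD cs j ' '] ++ "</span>"
        else String.mk [PySem.List.pyGetD cs j ' ']) := by
    have hfun : (fun (b : List String) (j : Int) =>
        if PySem.List.pyGetD pos j "" == "guide" then
          b ++ ["<span style='color:#0A8F5B;font-weight:700'>" ++ String.mk [PySem.List.pyGetD cs j ' '] ++ "</span>"]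
        else if PySem.List.pyGetD pos j "" == "pam" then
          b ++ ["<span style='color:#D83A3A;font-weight:800'>" ++ String.mk [PySem.List.pyGetD cs j ' '] ++ "</span>"]
        else b ++ [String.mk [PySem.List.pyGetD cs j ' ']]) =
        (fun (b : List String) (j : Int) => b ++ [
          if PySem.List.pyGetD pos j "" == "guide" then
            "<span style='color:#0A8F5B;font-weight:700'>" ++ String.mk [PySem.List.pyGetD cs j ' '] ++ "</span>"
          else if PySem.List.pyGetD pos j "" == "pam" then
            "<span style='color:#D83A3A;font-weight:800'>" ++ String.mk [PySem.List.pyGetD cs j ' '] ++ "</span>"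
          else String.mk [PySem.List.pyGetD cs j ' ']]) := by
      funext b j
      split_ifs <;> rfl
    rw [hfun]
    exact PySem.List.foldl_append_singleton_eq_map _ _ []
  rw [hinner, slice_eq_map_range rendered "" i width hi0 hw]
  have hlenr : (rendered.length : Int) = n := by
    rw [hrend]; simp [PySem.List.length_enumerate, hn]
  rw [hlenr]
  congr 1
  apply List.map_congr_left
  intro j hj
  obtain ⟨hji, hjn⟩ := (PySem.List.mem_pyRange_one).mp hj
  have hj0 : (0 : Int) ≤ j := by omega
  have hjlt : j < n := by omega
  -- pos[j] is B's category
  have hposlen : j.toNat < pos.length := by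
    rw [hpos, length_paintAll, List.length_replicate]; omega
  have hposj : PySem.List.pyGetD pos j "" = pvCategory n j revg := by
    rw [PySem.List.pyGetD_eq_getElem _ "" hj0 (by omega)]
    have h1 : pos[j.toNat]? = some (pvCategory n (j.toNat : Int) revg) := by
      rw [hpos, hrevg, hn]
      exact pos_getElem? (cs.length : Int) guides_meta cs.length j.toNat (by omega)
    rw [List.getElem?_eq_getElem hposlen] at h1
    have h3 := Option.some.inj h1
    rw [h3]
    congr 1
    omega
  rw [hrend, hn, rendered_pyGetD cs revg j "" hj0 (by omega), ← hn, hposj]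
  unfold pvPaintChar
  rfl
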